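-- pv_equiv track=rewrite | github.com/koul/AI_Guide_Dog | Utils/transformer.py | slice_timestamp
-- ===== SOURCE A (Python) =====
-- def slice_timestamp(array, start_time, end_time):
--   start_pos = 0
--   end_pos = len(array)
--   for idx,ele in enumerate(array):
--     if ele >= start_time:
--       start_pos = idx
--       break
--   for idx,ele in enumerate(array[::-1]):
--     if ele <= end_time:
--       end_pos = len(array) - idx -1 #since we're traversing in reverse
--       break
--   return array[start_pos:end_pos+1]
-- ===== SOURCE B (Python) =====
-- def slice_timestamp(array, start_time, end_time):
--     first_ge = None
--     last_le = None
--     for idx, ele in enumerate(array):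
--         if first_ge is None and ele >= start_time:
--             first_ge = idx
--         if ele <= end_time:
--             last_le = idx
--     start_pos = 0 if first_ge is None else first_ge
--     end_pos = len(array) if last_le is None else last_le
--     return array[start_pos:end_pos + 1]
-- ===== Notes on version B (the rewrite author's own statement) =====
-- stated objective: alternative
-- what changed: Replaces A's two break-loops (one over a reversed copy of the array) by a single forward pass that tracks the first index with ele>=start_time and the last index with ele<=end_time, then slices once.
import Mathlib
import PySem

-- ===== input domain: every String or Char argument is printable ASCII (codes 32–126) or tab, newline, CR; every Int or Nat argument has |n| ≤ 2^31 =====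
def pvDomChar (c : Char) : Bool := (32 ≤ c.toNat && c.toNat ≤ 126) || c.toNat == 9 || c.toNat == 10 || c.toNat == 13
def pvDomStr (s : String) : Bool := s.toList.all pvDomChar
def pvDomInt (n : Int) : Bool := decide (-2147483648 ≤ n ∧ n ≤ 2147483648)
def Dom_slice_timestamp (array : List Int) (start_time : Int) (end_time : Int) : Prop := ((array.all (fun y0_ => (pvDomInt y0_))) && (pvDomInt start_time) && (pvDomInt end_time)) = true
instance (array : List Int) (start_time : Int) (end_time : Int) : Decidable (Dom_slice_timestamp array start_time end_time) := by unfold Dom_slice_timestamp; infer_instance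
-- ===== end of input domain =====

-- B replaces A's two break-loops (one over a reversed copy) by a single forward pass
-- tracking both boundary indices; same O(n) cost, alternative structure.

-- ===== PORT A =====
-- first for-loop of A: first index i (from offset) with ele >= start_time ('break')
def pvAFirstGE (l : List Int) (t : Int) (i : Int) : Option Int :=
  match l with
  | [] => none
  | e :: r => if t ≤ e then some i else pvAFirstGE r t (i + 1)

-- second for-loop of A over array[::-1]: first index with ele <= end_time ('break')
def pvAFirstLE (l : List Int) (t : Int) (i : Int) : Option Int :=
  match l with
  | [] => none
  | e :: r => if e ≤ t then some i else pvAFirstLE r t (i + 1)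

def slice_timestamp (array : List Int) (start_time : Int) (end_time : Int) : List Int :=
  let start_pos : Int := (pvAFirstGE array start_time 0).getD 0
  let end_pos : Int :=
    match pvAFirstLE array.reverse end_time 0 with   -- array[::-1] is the reversed list
    | some idx => (array.length : Int) - idx - 1
    | none => (array.length : Int)
  PySem.List.slice array (some start_pos) (some (end_pos + 1))

-- ===== PORT B =====
def pvBStep (start_time end_time : Int) (p : Option Int × Option Int) (ie : Int × Int) :
    Option Int × Option Int :=
  ((if p.1.isNone && start_time ≤ ie.2 then some ie.1 else p.1),
   (if ie.2 ≤ end_time then some ie.1 else p.2))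

def slice_timestamp_alt (array : List Int) (start_time : Int) (end_time : Int) : List Int :=
  let st := (PySem.List.enumerate array).foldl (pvBStep start_time end_time) (none, none)
  let start_pos : Int := st.1.getD 0
  let end_pos : Int := st.2.getD (array.length : Int)
  PySem.List.slice array (some start_pos) (some (end_pos + 1))

-- ===== PRECONDITION & SPEC =====
def Spec_slice_timestamp (array : List Int) (start_time : Int) (end_time : Int) (out : List Int) : Prop := out = slice_timestamp_alt array start_time end_time
instance (array : List Int) (start_time : Int) (end_time : Int) (out : List Int) : Decidable (Spec_slice_timestamp array start_time end_time out) := by unfold Spec_slice_timestamp; infer_instance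

-- ===== CLAIM (what is proved, stated in full; the proofs are below) =====
def Claim_equal_slice_timestamp : Prop := ∀ (array : List Int) (start_time : Int) (end_time : Int), Dom_slice_timestamp array start_time end_time → Spec_slice_timestamp array start_time end_time (slice_timestamp array start_time end_time)

-- ===== LEMMAS AND PROOFS =====

-- first-match / last-match combinator used only in the proofs
def pvOr (a b : Option Int) : Option Int :=
  match a with
  | some x => some x
  | none => b

-- index of the LAST element <= t (offset i), recursively
def pvLastLE (l : List Int) (t : Int) (i : Int) : Option Int :=
  match l with
  | [] => none
  | e :: r => pvOr (pvLastLE r t (i + 1)) (if e ≤ t then some i else none)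

theorem pvOr_assoc (a b c : Option Int) : pvOr (pvOr a b) c = pvOr a (pvOr b c) := by
  cases a <;> simp [pvOr]

theorem fold_eq (s e : Int) (l : List Int) (i : Int) (fg0 ll0 : Option Int) :
    (PySem.List.enumerate l i).foldl (pvBStep s e) (fg0, ll0)
      = (pvOr fg0 (pvAFirstGE l s i), pvOr (pvLastLE l e i) ll0) := by
  induction l generalizing i fg0 ll0 with
  | nil => cases fg0 <;> simp [PySem.List.enumerate_nil, pvAFirstGE, pvLastLE, pvOr]
  | cons x r ih =>
    rw [PySem.List.enumerate_cons, List.foldl_cons, ih]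
    refine Prod.ext ?_ ?_
    · -- first component
      cases fg0 with
      | some a => simp [pvBStep, pvOr]
      | none =>
        by_cases h : s ≤ x <;> simp [pvBStep, pvOr, pvAFirstGE, h]
    · -- second component
      rw [pvLastLE, pvOr_assoc]
      by_cases h : x ≤ e <;> simp [pvBStep, pvOr, h]

theorem firstLE_append (a b : List Int) (t i : Int) :
    pvAFirstLE (a ++ b) t i = pvOr (pvAFirstLE a t i) (pvAFirstLE b t (i + a.length)) := by
  induction a generalizing i with
  | nil => simp [pvAFirstLE, pvOr]
  | cons x r ih =>
    by_cases h : x ≤ t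
    · simp [pvAFirstLE, h, pvOr]
    · simp only [List.cons_append, pvAFirstLE, if_neg h, ih, List.length_cons]
      congr 2
      push_cast
      ring

theorem lastLE_rev (l : List Int) (t : Int) (i : Int) :
    pvLastLE l t i = (pvAFirstLE l.reverse t 0).map (fun n => i + (l.length : Int) - 1 - n) := by
  induction l generalizing i with
  | nil => simp [pvLastLE, pvAFirstLE]
  | cons x r ih =>
    rw [pvLastLE, ih, List.reverse_cons, firstLE_append]
    cases hr : pvAFirstLE r.reverse t 0 with
    | some n =>
      simp only [pvOr, Option.map_some, List.length_cons]
      congr 1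
      push_cast
      ring
    | none =>
      by_cases h : x ≤ t
      · simp [pvOr, pvAFirstLE, h, List.length_reverse]
        omega
      · simp [pvOr, pvAFirstLE, hr, h]

-- ===== VERDICT (by name: the statement is the Claim_ definition above) =====
theorem slice_timestamp_spec : Claim_equal_slice_timestamp := by
  intro array s e _
  unfold Spec_slice_timestamp slice_timestamp slice_timestamp_alt
  rw [fold_eq]
  have hstart : pvOr none (pvAFirstGE array s 0) = pvAFirstGE array s 0 := by simp [pvOr]
  have hend : pvOr (pvLastLE array e 0) none = pvLastLE array e 0 := by
    cases pvLastLE array e 0 <;> simp [pvOr]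
  rw [hstart, hend, lastLE_rev]
  cases h : pvAFirstLE array.reverse e 0 with
  | some n =>
    simp only [Option.map_some, Option.getD_some]
    congr 2
    ring
  | none => simp
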